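-- pv_equiv track=rewrite | github.com/cahudson94/code-wars-practice | 6_kyu/2023/dec/typing_series_4_left_and_right_arrow_keys.py | type_out
-- ===== SOURCE A (Python) =====
-- def type_out(s):
--     s = s.split("*")
--     for idx, x in enumerate(s):
--         if (x.endswith(">") or x.endswith("<")) and idx != len(s) - 1:
--             next_val = s[idx + 1]
--             num = ""
--             for y in next_val:
--                 if not y.isdigit():
--                     break
--                 num += y
--             s[idx] = x[:-1] + (x[-1] * int(num))
--             s[idx + 1] = s[idx + 1][len(num):]
--     s = "".join(s).lstrip("<>").rstrip("<>")
--     idx_offset = 0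
--     out_str = ""
--     for x in s:
--         if x == "<":
--             idx_offset = max(idx_offset - 1, 0)
--             continue
--         if x == ">":
--             idx_offset = min(idx_offset + 1, len(out_str))
--             continue
--         out_str = out_str[:idx_offset] + x + out_str[idx_offset:]
--         idx_offset += 1
--     return out_str
-- ===== SOURCE B (Python) =====
-- def type_out(s):
--     # phase 1: expand "X*<digits>" repeats in one left-to-right pass over the chunks
--     chunks = s.split("*")
--     pieces = []
--     cur = chunks[0]
--     for nxt in chunks[1:]:
--         if cur and cur[-1] in "<>":
--             k = 0
--             while k < len(nxt) and nxt[k].isdigit():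
--                 k += 1
--             if k:
--                 pieces.append(cur[:-1] + cur[-1] * int(nxt[:k]))
--                 cur = nxt[k:]
--                 continue
--         pieces.append(cur)
--         cur = nxt
--     pieces.append(cur)
--     # phase 2: two-stack cursor buffer, O(1) per keystroke
--     left, right = [], []
--     for piece in pieces:
--         for ch in piece:
--             if ch == "<":
--                 if left:
--                     right.append(left.pop())
--             elif ch == ">":
--                 if right:
--                     left.append(right.pop())
--             else:
--                 left.append(ch)
--     return "".join(left) + "".join(reversed(right))
-- ===== Notes on version B (the rewrite author's own statement) =====
-- stated objective: faster
-- what changed: Repeat-expansion becomes a single sequential pass over the '*'-chunks (no index loop mutating the list), and the cursor simulation uses a two-stack buffer with O(1) per keystroke instead of rebuilding the string by slicing at every insertion.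
-- crash fix: A raises ValueError (int('')) when a chunk ending in '<' or '>' is followed by a '*' not followed by a digit; B simply treats that '*' as a plain separator and returns the typed text. — e.g. on type_out("a<*"): A raises ValueError, B returns "a"
import Mathlib
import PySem

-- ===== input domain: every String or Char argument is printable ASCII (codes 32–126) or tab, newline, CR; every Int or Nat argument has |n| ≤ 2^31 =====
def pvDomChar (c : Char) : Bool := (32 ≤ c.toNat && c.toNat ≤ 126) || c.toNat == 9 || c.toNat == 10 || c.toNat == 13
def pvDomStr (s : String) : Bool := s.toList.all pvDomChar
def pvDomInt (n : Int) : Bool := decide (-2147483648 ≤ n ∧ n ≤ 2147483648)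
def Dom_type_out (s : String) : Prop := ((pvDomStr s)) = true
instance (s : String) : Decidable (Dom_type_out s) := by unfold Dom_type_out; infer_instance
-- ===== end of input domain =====

-- B replaces A's index loop that mutates the chunk list by one sequential pass over the
-- chunks, and replaces A's slice-and-rebuild cursor simulation by a two-stack buffer
-- (objective: faster).

-- ===== PORT A =====
-- x.endswith(">") or x.endswith("<")
def pvEndsArrow (x : List Char) : Bool :=
  PySem.Chars.endswith x ['>'] || PySem.Chars.endswith x ['<']

-- A's inner loop: num = ""; for y in next_val: if not y.isdigit(): break; num += y
def pvDigitsPrefix : List Char → List Char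
  | [] => []
  | y :: ys => if PySem.Chars.isdigit y then y :: pvDigitsPrefix ys else []

-- the body of A's `for idx, x in enumerate(s)` loop (s is the mutated chunk list)
def pvStepA (l : List (List Char)) (idx : Nat) : List (List Char) :=
  let x := l.getD idx []
  if pvEndsArrow x && (idx != l.length - 1) then
    let nextVal := l.getD (idx + 1) []
    let num := pvDigitsPrefix nextVal
    -- int(num): Python raises ValueError when num = ""; Pre_type_out excludes exactly that
    let n : Int := (PySem.Int.ofStr? (String.mk num)).getD 0
    -- x[-1] (a 1-char string in Python); nonempty here since x ends with an arrow
    let last := (PySem.List.pyGet? x (-1)).getD ' '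
    let l' := l.set idx (PySem.List.slice x none (some (-1)) ++ PySem.List.pyRepeat [last] n)
    l'.set (idx + 1) (PySem.List.slice (l'.getD (idx + 1) []) (some ((num.length : Nat) : Int)) none)
  else l

-- the cursor loop: idx_offset / out_str, with string slicing at every insertion
def pvLoopA : Int → List Char → List Char → List Char
  | _, out, [] => out
  | off, out, x :: rest =>
    if x == '<' then pvLoopA (max (off - 1) 0) out rest
    else if x == '>' then pvLoopA (min (off + 1) ((out.length : Nat) : Int)) out rest
    else pvLoopA (off + 1)
      (PySem.List.slice out none (some off) ++ [x] ++ PySem.List.slice out (some off) none) rest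

def type_out (s : String) : String :=
  let chunks := PySem.Chars.splitOn s.toList ['*']
  let l := (List.range chunks.length).foldl pvStepA chunks
  -- "".join(s).lstrip("<>").rstrip("<>") : drop the maximal leading/trailing run of '<'/'>'
  let j0 := l.flatten
  let j1 := j0.dropWhile (fun c => c == '<' || c == '>')
  let j2 := (j1.reverse.dropWhile (fun c => c == '<' || c == '>')).reverse
  String.mk (pvLoopA 0 [] j2)

-- ===== PORT B =====
-- Source B phase 1: one pass, cur/nxt over the chunk list
def pvExpandB : List Char → List (List Char) → List (List Char)
  | cur, [] => [cur]
  | cur, nxt :: rest =>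
    if !cur.isEmpty && (cur.getLastD ' ' == '<' || cur.getLastD ' ' == '>') then
      let num := nxt.takeWhile PySem.Chars.isdigit
      if num.isEmpty then cur :: pvExpandB nxt rest
      else
        (cur.dropLast ++
            List.replicate ((PySem.Int.ofStr? (String.mk num)).getD 0).toNat (cur.getLastD ' '))
          :: pvExpandB (nxt.drop num.length) rest
    else cur :: pvExpandB nxt rest

-- Source B phase 2: two stacks (Python list-as-stack ↦ cons list, top at the head)
def pvLoopB : List Char → List Char → List Char → List Char × List Char
  | left, right, [] => (left, right)
  | left, right, ch :: rest =>
    if ch == '<' then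
      match left with
      | [] => pvLoopB [] right rest
      | c :: left' => pvLoopB left' (c :: right) rest
    else if ch == '>' then
      match right with
      | [] => pvLoopB left [] rest
      | c :: right' => pvLoopB (c :: left) right' rest
    else pvLoopB (ch :: left) right rest

def type_out_alt (s : String) : String :=
  let chunks := PySem.Chars.splitOn s.toList ['*']
  let pieces := pvExpandB (chunks.headD []) chunks.tail
  -- `for piece in pieces: for ch in piece` = one loop over the concatenation
  let lr := pvLoopB [] [] pieces.flatten
  -- "".join(left) + "".join(reversed(right)) (stacks are stored top-first here)
  String.mk (lr.1.reverse ++ lr.2)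

-- ===== PRECONDITION & SPEC =====
-- Pre_ excludes exactly the inputs on which A raises ValueError (int("")): some '*'-chunk
-- ending in '<' or '>' whose successor chunk does not start with a digit.
def pvGood : List (List Char) → Prop
  | [] => True
  | [_] => True
  | x :: y :: r =>
      (pvEndsArrow x = true → PySem.Chars.isdigit (y.headD ' ') = true) ∧ pvGood (y :: r)

def pvGoodDec : (l : List (List Char)) → Decidable (pvGood l)
  | [] => by unfold pvGood; infer_instance
  | [_] => by unfold pvGood; infer_instance
  | _ :: y :: r =>
      have : Decidable (pvGood (y :: r)) := pvGoodDec (y :: r)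
      by unfold pvGood; infer_instance

def Pre_type_out (s : String) : Prop := pvGood (PySem.Chars.splitOn s.toList ['*'])
instance (s : String) : Decidable (Pre_type_out s) := by unfold Pre_type_out; exact pvGoodDec _

def pvWitness_type_out : String := "ab<*2x>*3<ok"

-- A raises ValueError (int('')) when a chunk ending in '<' or '>' is followed by a '*' not
-- followed by a digit; B treats that '*' as a plain separator and returns the typed text.
def Raises_type_out (s : String) : Prop := ¬ Pre_type_out s
instance (s : String) : Decidable (Raises_type_out s) := by unfold Raises_type_out; infer_instance
def pvRaiseWitness_type_out : String := "a<*"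
def pvRaiseWitnessOut_type_out : String := "a"

def Spec_type_out (s : String) (out : String) : Prop := out = type_out_alt s
instance (s : String) (out : String) : Decidable (Spec_type_out s out) := by unfold Spec_type_out; infer_instance

-- ===== CLAIM (what is proved, stated in full; the proofs are below) =====
def Claim_equal_type_out : Prop := ∀ (s : String), Dom_type_out s → Pre_type_out s → Spec_type_out s (type_out s)
def Claim_raises_type_out : Prop := (∀ (s : String), Dom_type_out s → Raises_type_out s → ¬ Pre_type_out s) ∧ (Dom_type_out (pvRaiseWitness_type_out) ∧ Raises_type_out (pvRaiseWitness_type_out) ∧ type_out_alt (pvRaiseWitness_type_out) = pvRaiseWitnessOut_type_out)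

-- ===== LEMMAS AND PROOFS =====

lemma singleton_suffix_iff (a : Char) (l : List Char) : [a] <:+ l ↔ l.getLast? = some a := by
  constructor
  · rintro ⟨t, rfl⟩; simp
  · intro h
    obtain ⟨l', rfl⟩ := List.getLast?_eq_some_iff.1 h
    exact ⟨l', rfl⟩

lemma pvEndsArrow_eq (x : List Char) :
    pvEndsArrow x = (!x.isEmpty && (x.getLastD ' ' == '<' || x.getLastD ' ' == '>')) := by
  rw [Bool.eq_iff_iff]
  cases hx : x.getLast? with
  | none =>
    have : x = [] := List.getLast?_eq_none_iff.1 hx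
    subst this
    simp [pvEndsArrow]
    exact ⟨by decide, by decide⟩
  | some c =>
    obtain ⟨l', rfl⟩ := List.getLast?_eq_some_iff.1 hx
    simp [pvEndsArrow, PySem.Chars.endswith_iff, singleton_suffix_iff, hx,
      List.getLastD_eq_getLast?]
    tauto

lemma pvDigitsPrefix_eq (l : List Char) : pvDigitsPrefix l = l.takeWhile PySem.Chars.isdigit := by
  induction l with
  | nil => rfl
  | cons y ys ih => simp [pvDigitsPrefix, List.takeWhile_cons, ih]

lemma getD_len_append {α : Type} (pre : List α) (x : α) (r : List α) (d : α) :
    (pre ++ x :: r).getD pre.length d = x := by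
  induction pre with
  | nil => rfl
  | cons a t ih => simpa using ih

lemma getD_len1_append {α : Type} (pre : List α) (x y : α) (r : List α) (d : α) :
    (pre ++ x :: y :: r).getD (pre.length + 1) d = y := by
  induction pre with
  | nil => rfl
  | cons a t ih => simpa using ih

lemma set_len_append {α : Type} (pre : List α) (x y : α) (r : List α) :
    (pre ++ x :: r).set pre.length y = pre ++ y :: r := by
  induction pre with
  | nil => rfl
  | cons a t ih => simpa using ih

lemma set_len1_append {α : Type} (pre : List α) (x y z : α) (r : List α) :
    (pre ++ x :: y :: r).set (pre.length + 1) z = pre ++ x :: z :: r := by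
  induction pre with
  | nil => rfl
  | cons a t ih => simpa using ih

lemma slice_neg_one (l : List Char) : PySem.List.slice l none (some (-1)) = l.dropLast := by
  simp [PySem.List.slice]
  rw [List.dropLast_eq_take]

lemma slice_to' (l : List Char) (k : Nat) :
    PySem.List.slice l none (some ((k : Nat) : Int)) = l.take k := by
  simp [PySem.List.slice]

lemma slice_from' (l : List Char) (k : Nat) :
    PySem.List.slice l (some ((k : Nat) : Int)) none = l.drop k := by
  simp [PySem.List.slice]
  rcases Nat.le_total k l.length with h | h
  · rw [Nat.min_eq_left h]
    exact List.take_of_length_le (by simp)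
  · rw [Nat.min_eq_right h]
    simp [List.drop_eq_nil_of_le h]

lemma pyGet_neg_one (l : List Char) (h : l ≠ []) :
    (PySem.List.pyGet? l (-1)).getD ' ' = l.getLastD ' ' := by
  simp [PySem.List.pyGet?, PySem.List.pyIdx?]
  rw [if_pos (by cases l with | nil => exact absurd rfl h | cons a t => simp)]
  simp [List.getLast?_eq_getElem?]

lemma ends_of_drop (k : Nat) (l : List Char) (h : pvEndsArrow (l.drop k) = true) :
    pvEndsArrow l = true := by
  simp only [pvEndsArrow, Bool.or_eq_true, PySem.Chars.endswith_iff] at h ⊢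
  rcases h with h | h
  · exact Or.inl (h.trans (List.drop_suffix k l))
  · exact Or.inr (h.trans (List.drop_suffix k l))

lemma pvGood_drop (k : Nat) (nxt : List Char) (rest : List (List Char))
    (h : pvGood (nxt :: rest)) : pvGood (nxt.drop k :: rest) := by
  cases rest with
  | nil => trivial
  | cons z r =>
    have h' : (pvEndsArrow nxt = true → PySem.Chars.isdigit (z.headD ' ') = true) ∧ pvGood (z :: r) := h
    exact ⟨fun he => h'.1 (ends_of_drop _ _ he), h'.2⟩

-- unfold equations for B's phase 1
lemma expandB_fire (cur nxt : List Char) (rest : List (List Char))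
    (hBc : (!cur.isEmpty && (cur.getLastD ' ' == '<' || cur.getLastD ' ' == '>')) = true)
    (hnum : (nxt.takeWhile PySem.Chars.isdigit).isEmpty = false) :
    pvExpandB cur (nxt :: rest)
      = (cur.dropLast ++
            List.replicate
              ((PySem.Int.ofStr? (String.mk (nxt.takeWhile PySem.Chars.isdigit))).getD 0).toNat
              (cur.getLastD ' '))
          :: pvExpandB (nxt.drop (nxt.takeWhile PySem.Chars.isdigit).length) rest := by
  simp only [pvExpandB]
  rw [hBc, hnum]
  simp

lemma expandB_skip (cur nxt : List Char) (rest : List (List Char))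
    (hBc : (!cur.isEmpty && (cur.getLastD ' ' == '<' || cur.getLastD ' ' == '>')) = false) :
    pvExpandB cur (nxt :: rest) = cur :: pvExpandB nxt rest := by
  simp only [pvExpandB]
  rw [hBc]
  simp

-- the main phase-1 lemma: A's index loop over the mutated chunk list = B's sequential pass
lemma foldA_eq (rest : List (List Char)) : ∀ (cur : List Char) (pre : List (List Char)),
    pvGood (cur :: rest) →
    (List.range' pre.length (rest.length + 1)).foldl pvStepA (pre ++ cur :: rest)
      = pre ++ pvExpandB cur rest := by
  induction rest with
  | nil =>
    intro cur pre _
    show (List.range' pre.length 1).foldl pvStepA (pre ++ [cur]) = pre ++ pvExpandB cur []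
    rw [List.range'_one]
    simp only [List.foldl_cons, List.foldl_nil, pvExpandB]
    simp [pvStepA, List.length_append]
  | cons nxt rest' ih =>
    intro cur pre h
    have h' : (pvEndsArrow cur = true → PySem.Chars.isdigit (nxt.headD ' ') = true) ∧ pvGood (nxt :: rest') := h
    rw [List.range'_succ, List.foldl_cons]
    have hcond : (pre.length != (pre ++ cur :: nxt :: rest').length - 1) = true := by
      simp only [bne_iff_ne, ne_eq, List.length_append, List.length_cons]
      omega
    by_cases hA : pvEndsArrow cur = true
    · -- fire
      have hd : PySem.Chars.isdigit (nxt.headD ' ') = true := h'.1 hA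
      have hne : nxt ≠ [] := by
        intro e; rw [e] at hd; exact absurd hd (by decide)
      obtain ⟨d, nxt0, rfl⟩ : ∃ d nxt0, nxt = d :: nxt0 := by
        cases nxt with
        | nil => exact absurd rfl hne
        | cons a t => exact ⟨a, t, rfl⟩
      have hdd : PySem.Chars.isdigit d = true := by simpa using hd
      have hcurne : cur ≠ [] := by
        intro e; rw [e] at hA; exact absurd hA (by decide)
      have hstep : pvStepA (pre ++ cur :: (d :: nxt0) :: rest') pre.length
          = pre ++ (cur.dropLast ++
                List.replicate ((PySem.Int.ofStr? (String.mk (pvDigitsPrefix (d :: nxt0)))).getD 0).toNat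
                  (cur.getLastD ' '))
              :: ((d :: nxt0).drop (pvDigitsPrefix (d :: nxt0)).length) :: rest' := by
        simp only [pvStepA, getD_len_append, hA, hcond, Bool.and_self, if_pos,
          set_len_append, getD_len1_append, set_len1_append,
          slice_neg_one, pyGet_neg_one _ hcurne, PySem.List.pyRepeat_singleton, slice_from']
      rw [hstep]
      have ih' := ih ((d :: nxt0).drop (pvDigitsPrefix (d :: nxt0)).length)
        (pre ++ [cur.dropLast ++
            List.replicate ((PySem.Int.ofStr? (String.mk (pvDigitsPrefix (d :: nxt0)))).getD 0).toNat
              (cur.getLastD ' ')])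
        (pvGood_drop _ _ _ h'.2)
      simp only [List.length_append, List.length_cons, List.length_nil, List.append_assoc,
        List.singleton_append, Nat.zero_add] at ih' ⊢
      rw [ih']
      have hBc : (!cur.isEmpty && (cur.getLastD ' ' == '<' || cur.getLastD ' ' == '>')) = true := by
        rw [← pvEndsArrow_eq]; exact hA
      have hnumne : ((d :: nxt0).takeWhile PySem.Chars.isdigit).isEmpty = false := by
        simp [hdd]
      rw [pvDigitsPrefix_eq, expandB_fire cur (d :: nxt0) rest' hBc hnumne]
    · -- no-op
      have hAf : pvEndsArrow cur = false := by
        cases hc : pvEndsArrow cur with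
        | false => rfl
        | true => exact absurd hc hA
      have hstep : pvStepA (pre ++ cur :: nxt :: rest') pre.length = pre ++ cur :: nxt :: rest' := by
        simp [pvStepA, hAf]
      rw [hstep]
      have ih' := ih nxt (pre ++ [cur]) h'.2
      simp only [List.length_append, List.length_cons, List.length_nil, List.append_assoc,
        List.singleton_append, Nat.zero_add] at ih' ⊢
      rw [ih']
      have hBc : (!cur.isEmpty && (cur.getLastD ' ' == '<' || cur.getLastD ' ' == '>')) = false := by
        rw [← pvEndsArrow_eq]; exact hAf
      rw [expandB_skip cur nxt rest' hBc]

-- unfold equations for the two loops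
lemma loopA_lt (off : Int) (out rest : List Char) :
    pvLoopA off out ('<' :: rest) = pvLoopA (max (off - 1) 0) out rest := by
  simp [pvLoopA]

lemma loopA_gt (off : Int) (out rest : List Char) :
    pvLoopA off out ('>' :: rest) = pvLoopA (min (off + 1) ((out.length : Nat) : Int)) out rest := by
  simp [pvLoopA]

lemma loopA_ins (off : Int) (out : List Char) (x : Char) (rest : List Char)
    (h1 : (x == '<') = false) (h2 : (x == '>') = false) :
    pvLoopA off out (x :: rest)
      = pvLoopA (off + 1)
          (PySem.List.slice out none (some off) ++ [x] ++ PySem.List.slice out (some off) none)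
          rest := by
  simp [pvLoopA, h1, h2]

lemma loopB_lt_nil (R rest : List Char) :
    pvLoopB [] R ('<' :: rest) = pvLoopB [] R rest := by
  simp [pvLoopB]

lemma loopB_lt_cons (c : Char) (L R rest : List Char) :
    pvLoopB (c :: L) R ('<' :: rest) = pvLoopB L (c :: R) rest := by
  simp [pvLoopB]

lemma loopB_gt_nil (L rest : List Char) :
    pvLoopB L [] ('>' :: rest) = pvLoopB L [] rest := by
  simp [pvLoopB]

lemma loopB_gt_cons (c : Char) (L R rest : List Char) :
    pvLoopB L (c :: R) ('>' :: rest) = pvLoopB (c :: L) R rest := by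
  simp [pvLoopB]

lemma loopB_ins (L R : List Char) (x : Char) (rest : List Char)
    (h1 : (x == '<') = false) (h2 : (x == '>') = false) :
    pvLoopB L R (x :: rest) = pvLoopB (x :: L) R rest := by
  simp [pvLoopB, h1, h2]

-- phase 2: A's offset/slicing loop simulates B's two stacks
-- invariant: idx_offset = left.length, out_str = left.reverse ++ right
lemma loopA_eq_loopB (t : List Char) : ∀ (L R : List Char),
    pvLoopA ((L.length : Nat) : Int) (L.reverse ++ R) t
      = (pvLoopB L R t).1.reverse ++ (pvLoopB L R t).2 := by
  induction t with
  | nil => intro L R; rfl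
  | cons x rest ih =>
    intro L R
    by_cases h1 : x = '<'
    · subst h1
      cases L with
      | nil =>
        rw [loopA_lt, loopB_lt_nil]
        have e : max ((((List.nil (α := Char)).length : Nat) : Int) - 1) 0
            = (((List.nil (α := Char)).length : Nat) : Int) := by simp
        rw [e]
        exact ih [] R
      | cons c L' =>
        rw [loopA_lt, loopB_lt_cons]
        have e : max ((((c :: L').length : Nat) : Int) - 1) 0 = ((L'.length : Nat) : Int) := by
          simp only [List.length_cons]; push_cast; omega
        have e2 : (c :: L').reverse ++ R = L'.reverse ++ (c :: R) := by simp
        rw [e, e2]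
        exact ih L' (c :: R)
    · by_cases h2 : x = '>'
      · subst h2
        cases R with
        | nil =>
          rw [loopA_gt, loopB_gt_nil]
          have e : min (((L.length : Nat) : Int) + 1)
                (((L.reverse ++ (List.nil (α := Char))).length : Nat) : Int)
              = ((L.length : Nat) : Int) := by
            simp only [List.append_nil, List.length_reverse]; omega
          rw [e]
          exact ih L []
        | cons c R' =>
          rw [loopA_gt, loopB_gt_cons]
          have e : min (((L.length : Nat) : Int) + 1) (((L.reverse ++ c :: R').length : Nat) : Int)
              = (((c :: L).length : Nat) : Int) := by
            simp only [List.length_append, List.length_reverse, List.length_cons]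
            push_cast; omega
          have e2 : L.reverse ++ c :: R' = (c :: L).reverse ++ R' := by simp
          rw [e, e2]
          exact ih (c :: L) R'
      · have hb1 : (x == '<') = false := by simp [h1]
        have hb2 : (x == '>') = false := by simp [h2]
        rw [loopA_ins _ _ _ _ hb1 hb2, loopB_ins _ _ _ _ hb1 hb2]
        rw [slice_to', slice_from']
        rw [List.take_left' (by simp), List.drop_left' (by simp)]
        have e : ((L.length : Nat) : Int) + 1 = (((x :: L).length : Nat) : Int) := by
          simp only [List.length_cons]; push_cast; omega
        have e2 : L.reverse ++ [x] ++ R = (x :: L).reverse ++ R := by simp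
        rw [e, e2]
        exact ih (x :: L) R

lemma loopB_append (t u : List Char) : ∀ (L R : List Char),
    pvLoopB L R (t ++ u) = pvLoopB (pvLoopB L R t).1 (pvLoopB L R t).2 u := by
  induction t with
  | nil => intro L R; rfl
  | cons c t ih =>
    intro L R
    by_cases h1 : c = '<'
    · subst h1
      cases L with
      | nil => rw [List.cons_append, loopB_lt_nil, loopB_lt_nil]; exact ih [] R
      | cons a L' => rw [List.cons_append, loopB_lt_cons, loopB_lt_cons]; exact ih L' (a :: R)
    · by_cases h2 : c = '>'
      · subst h2
        cases R with
        | nil => rw [List.cons_append, loopB_gt_nil, loopB_gt_nil]; exact ih L []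
        | cons a R' => rw [List.cons_append, loopB_gt_cons, loopB_gt_cons]; exact ih (a :: L) R'
      · have hb1 : (c == '<') = false := by simp [h1]
        have hb2 : (c == '>') = false := by simp [h2]
        rw [List.cons_append, loopB_ins _ _ _ _ hb1 hb2, loopB_ins _ _ _ _ hb1 hb2]
        exact ih (c :: L) R

-- a run of arrows never changes the rendered text
lemma loopB_arrows : ∀ (u : List Char), (∀ c ∈ u, (c == '<' || c == '>') = true) →
    ∀ (L R : List Char),
    (pvLoopB L R u).1.reverse ++ (pvLoopB L R u).2 = L.reverse ++ R := by
  intro u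
  induction u with
  | nil => intro _ L R; rfl
  | cons c u ih =>
    intro h L R
    have hc : c = '<' ∨ c = '>' := by
      have := h c (List.mem_cons_self ..)
      simpa using this
    have htl : ∀ c ∈ u, (c == '<' || c == '>') = true :=
      fun c hcu => h c (List.mem_cons_of_mem _ hcu)
    rcases hc with rfl | rfl
    · cases L with
      | nil => rw [loopB_lt_nil]; exact ih htl [] R
      | cons a L' =>
        rw [loopB_lt_cons, ih htl L' (a :: R)]
        simp
    · cases R with
      | nil => rw [loopB_gt_nil]; exact ih htl L []
      | cons a R' =>
        rw [loopB_gt_cons, ih htl (a :: L) R']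
        simp

-- leading arrows are no-ops from the empty state
lemma loopB_dropWhile (j : List Char) :
    pvLoopB [] [] (j.dropWhile (fun c => c == '<' || c == '>')) = pvLoopB [] [] j := by
  induction j with
  | nil => rfl
  | cons a j ih =>
    by_cases h : (a == '<' || a == '>') = true
    · simp only [List.dropWhile_cons]
      rw [h, if_pos rfl, ih]
      have hc : a = '<' ∨ a = '>' := by simpa using h
      rcases hc with rfl | rfl
      · rw [loopB_lt_nil]
      · rw [loopB_gt_nil]
    · have h' : (a == '<' || a == '>') = false := by simpa using h
      simp only [List.dropWhile_cons]
      rw [h']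
      simp

-- lstrip + rstrip of arrows does not change B's rendered result
lemma render_strip (j : List Char) :
    pvLoopA 0 []
        (((j.dropWhile (fun c => c == '<' || c == '>')).reverse.dropWhile
            (fun c => c == '<' || c == '>')).reverse)
      = (pvLoopB [] [] j).1.reverse ++ (pvLoopB [] [] j).2 := by
  have key : ∀ z : List Char,
      pvLoopA 0 [] z = (pvLoopB [] [] z).1.reverse ++ (pvLoopB [] [] z).2 := by
    intro z; simpa using loopA_eq_loopB z [] []
  rw [key]
  conv_rhs => rw [← loopB_dropWhile j]
  generalize j.dropWhile (fun c => c == '<' || c == '>') = m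
  have hsplit : m = (m.reverse.dropWhile (fun c => c == '<' || c == '>')).reverse
      ++ (m.reverse.takeWhile (fun c => c == '<' || c == '>')).reverse := by
    conv_lhs => rw [← List.reverse_reverse m,
      ← List.takeWhile_append_dropWhile (p := fun c : Char => c == '<' || c == '>') (l := m.reverse)]
    rw [List.reverse_append]
  have htail : ∀ c ∈ (m.reverse.takeWhile (fun c : Char => c == '<' || c == '>')).reverse,
      (c == '<' || c == '>') = true := by
    intro c hc
    have := List.mem_takeWhile_imp (p := fun c : Char => c == '<' || c == '>')
      (List.mem_reverse.1 hc)
    simpa using this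
  conv_rhs => rw [hsplit]
  rw [loopB_append]
  exact (loopB_arrows _ htail _ _).symm

-- ===== VERDICT (by name: the statement is the Claim_ definition above) =====
theorem type_out_spec : Claim_equal_type_out := by
  unfold Claim_equal_type_out
  intro s _ hpre
  unfold Spec_type_out type_out type_out_alt
  unfold Pre_type_out at hpre
  cases hcs : PySem.Chars.splitOn s.toList ['*'] with
  | nil => rfl
  | cons c0 ct =>
    rw [hcs] at hpre
    have h1 : (List.range (c0 :: ct).length).foldl pvStepA (c0 :: ct) = pvExpandB c0 ct := by
      have := foldA_eq ct c0 [] hpre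
      simpa [List.range_eq_range'] using this
    simp only [h1, List.headD_cons, List.tail_cons]
    rw [render_strip]

theorem type_out_raises : Claim_raises_type_out := by
  unfold Claim_raises_type_out
  exact ⟨fun s _ h => h, by decide⟩

-- self-check of the crash-fix block: the witness is inside Raises_ and B returns the stated value
theorem type_out_raises_witness_ok :
    Raises_type_out pvRaiseWitness_type_out
      ∧ type_out_alt pvRaiseWitness_type_out = pvRaiseWitnessOut_type_out :=
  ⟨type_out_raises.2.2.1, type_out_raises.2.2.2⟩
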